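-- pv_equiv track=rewrite | github.com/Bobcatsoap/jy-server | common/Utility.py | retLvInfo
-- ===== SOURCE A (Python) =====
-- def retLvInfo(_total_exp, _lv_exp_config):
--     """
--
--     :param _total_exp:
--     :param _lv_exp_config:
--     :return:
--     """
--     _lv = 0
--     _lv_max = len(_lv_exp_config) - 1
--     while True:
--         _total_exp -= _lv_exp_config[_lv]
--         if _total_exp < 0:
--             _c_lv = _lv
--             _c_lv_max = _lv_exp_config[_c_lv]
--             _c_exp = _total_exp + _lv_exp_config[_c_lv]
--             return _c_lv, _c_exp, _c_lv_max
--         else: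
--             _lv += 1
--             if _lv > _lv_max:
--                 _c_lv = _lv - 1
--                 return _c_lv, _lv_exp_config[_c_lv], _lv_exp_config[_c_lv]
-- ===== SOURCE B (Python) =====
-- def retLvInfo(_total_exp, _lv_exp_config):
--     # cumulative cost table, then find the first prefix that exceeds the total
--     prefix = []
--     s = 0
--     for c in _lv_exp_config:
--         s += c
--         prefix.append(s)
--     base = 0
--     for lv, p in enumerate(prefix):
--         if p > _total_exp:
--             return lv, _total_exp - base, p - base
--         base = p
--     last = _lv_exp_config[-1]
--     return len(_lv_exp_config) - 1, last, last
-- ===== Notes on version B (the rewrite author's own statement) =====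
-- stated objective: alternative
-- what changed: B precomputes a cumulative-cost prefix table in one pass and then scans it for the first prefix exceeding the total (level = index, leftover = total minus previous prefix, cost = prefix difference), instead of A's destructive while-loop that repeatedly subtracts each level cost from the running total with early returns inside the loop.
import Mathlib
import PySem

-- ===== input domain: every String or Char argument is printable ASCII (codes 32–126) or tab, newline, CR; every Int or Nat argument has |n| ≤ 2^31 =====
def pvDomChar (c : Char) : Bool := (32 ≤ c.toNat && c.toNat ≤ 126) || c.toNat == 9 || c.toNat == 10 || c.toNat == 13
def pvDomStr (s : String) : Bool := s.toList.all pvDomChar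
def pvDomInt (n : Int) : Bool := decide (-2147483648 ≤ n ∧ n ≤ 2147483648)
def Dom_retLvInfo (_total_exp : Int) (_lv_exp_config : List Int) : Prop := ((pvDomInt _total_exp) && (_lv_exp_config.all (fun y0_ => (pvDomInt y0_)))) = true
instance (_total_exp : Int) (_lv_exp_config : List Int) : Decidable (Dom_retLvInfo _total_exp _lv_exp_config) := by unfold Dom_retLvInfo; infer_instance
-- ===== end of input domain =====

-- B replaces A's destructive subtract-in-a-while-loop by a cumulative prefix-cost table scanned
-- for the first entry exceeding the total (objective: alternative, same O(n) cost).

-- ===== PORT A =====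
-- while-loop of A as recursion over the state (_total_exp, _lv); cfg is fixed.
-- pyGet? = none is Python's IndexError (only reachable on an empty config, excluded by Pre_).
def retLvInfoGo (cfg : List Int) (total : Int) (lv : Nat) : Int × Int × Int :=
  match PySem.List.pyGet? cfg (lv : Int) with
  | none => (0, 0, 0)  -- IndexError; unreachable under Pre_
  | some c =>
    let t := total - c
    if t < 0 then ((lv : Int), t + c, c)
    else if (lv : Int) + 1 > (cfg.length : Int) - 1 then ((lv : Int), c, c)
    else retLvInfoGo cfg t (lv + 1)
termination_by cfg.length - lv
decreasing_by omega

def retLvInfo (_total_exp : Int) (_lv_exp_config : List Int) : Int × Int × Int :=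
  retLvInfoGo _lv_exp_config _total_exp 0

-- ===== PORT B =====
-- first loop of Source B: running sum producing the cumulative prefix table
def prefixSums : List Int → Int → List Int
  | [], _ => []
  | c :: rest, s => (s + c) :: prefixSums rest (s + c)

-- second loop of Source B: find first prefix exceeding the total, carrying (lv, base)
def scanPrefix (total : Int) : Nat → Int → List Int → Option (Int × Int × Int)
  | _, _, [] => none
  | lv, base, p :: rest =>
    if p > total then some ((lv : Int), total - base, p - base)
    else scanPrefix total (lv + 1) p rest

def retLvInfo_alt (_total_exp : Int) (_lv_exp_config : List Int) : Int × Int × Int :=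
  match scanPrefix _total_exp 0 0 (prefixSums _lv_exp_config 0) with
  | some r => r
  | none =>
    let last := (PySem.List.pyGet? _lv_exp_config (-1)).getD 0  -- _lv_exp_config[-1]; IndexError only on [], excluded by Pre_
    ((_lv_exp_config.length : Int) - 1, last, last)

-- ===== PRECONDITION & SPEC =====
-- A raises IndexError on the empty config (first subscript _lv_exp_config[0]); B raises there too.
def Pre_retLvInfo (_total_exp : Int) (_lv_exp_config : List Int) : Prop := _lv_exp_config ≠ []
instance (_total_exp : Int) (_lv_exp_config : List Int) : Decidable (Pre_retLvInfo _total_exp _lv_exp_config) := by unfold Pre_retLvInfo; infer_instance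
def pvWitness_retLvInfo : Int × List Int := (7, [3, 4, 5])

def Spec_retLvInfo (_total_exp : Int) (_lv_exp_config : List Int) (out : Int × Int × Int) : Prop := out = retLvInfo_alt _total_exp _lv_exp_config
instance (_total_exp : Int) (_lv_exp_config : List Int) (out : Int × Int × Int) : Decidable (Spec_retLvInfo _total_exp _lv_exp_config out) := by unfold Spec_retLvInfo; infer_instance

-- ===== CLAIM (what is proved, stated in full; the proofs are below) =====
def Claim_equal_retLvInfo : Prop := ∀ (_total_exp : Int) (_lv_exp_config : List Int), Dom_retLvInfo _total_exp _lv_exp_config → Pre_retLvInfo _total_exp _lv_exp_config → Spec_retLvInfo _total_exp _lv_exp_config (retLvInfo _total_exp _lv_exp_config)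

-- ===== LEMMAS AND PROOFS =====

-- Main loop invariant: with `suffix` the part of the config not yet consumed (suffix = cfg.drop lv)
-- and `base` the cost already subtracted from A's running total, the two loops agree.
theorem retLvInfo_main (suffix : List Int) : ∀ (cfg : List Int) (lv : Nat) (total base : Int),
    cfg.drop lv = suffix → suffix ≠ [] →
    retLvInfoGo cfg total lv =
      (match scanPrefix (total + base) lv base (prefixSums suffix base) with
       | some r => r
       | none => ((cfg.length : Int) - 1, (PySem.List.pyGet? cfg (-1)).getD 0,
                  (PySem.List.pyGet? cfg (-1)).getD 0)) := by
  induction suffix with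
  | nil => intro _ _ _ _ _ h; exact absurd rfl h
  | cons c rest ih =>
    intro cfg lv total base hdrop _
    have hget : PySem.List.pyGet? cfg (lv : Int) = some c := by
      rw [PySem.List.pyGet?_natCast]
      have : cfg[lv]? = (cfg.drop lv)[0]? := by simp [List.getElem?_drop]
      simp [this, hdrop]
    have hlen : cfg.length = lv + rest.length + 1 := by
      have := congrArg List.length hdrop
      simp [List.length_drop] at this
      omega
    rw [retLvInfoGo, hget]
    simp only [prefixSums, scanPrefix]
    by_cases hc : total - c < 0
    · have : base + c > total + base := by omega
      simp only [hc, if_true, this, if_true, Prod.mk.injEq]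
      and_intros <;> first | trivial | omega
    · have hng : ¬ (base + c > total + base) := by omega
      simp only [hc, if_false, hng, if_false]
      cases rest with
      | nil =>
        have hcap : (lv : Int) + 1 > (cfg.length : Int) - 1 := by
          simp only [List.length_nil] at hlen; omega
        simp only [hcap, if_true, prefixSums, scanPrefix]
        have hlast : PySem.List.pyGet? cfg (-1) = some c := by
          rw [PySem.List.pyGet?_neg_one]
          have h1 : cfg.length - 1 = lv := by omega
          rw [List.getLast?_eq_getElem?, h1]
          have : cfg[lv]? = (cfg.drop lv)[0]? := by simp [List.getElem?_drop]
          simp [this, hdrop]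
        simp only [hlast, Option.getD_some, hlen, Prod.mk.injEq, List.length_nil]
        and_intros <;> first | trivial | (push_cast; omega)
      | cons r rs =>
        have hcap : ¬ ((lv : Int) + 1 > (cfg.length : Int) - 1) := by
          simp only [List.length_cons] at hlen; omega
        simp only [hcap, if_false]
        have hdrop' : cfg.drop (lv + 1) = r :: rs := by
          have : cfg.drop (lv + 1) = (cfg.drop lv).drop 1 := by
            rw [List.drop_drop]
          rw [this, hdrop]; rfl
        have := ih cfg (lv + 1) (total - c) (base + c) hdrop' (by simp)
        rw [this]
        have : total - c + (base + c) = total + base := by ring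
        rw [this]

-- ===== VERDICT (by name: the statement is the Claim_ definition above) =====
theorem retLvInfo_spec : Claim_equal_retLvInfo := by
  intro total cfg _ hpre
  unfold Spec_retLvInfo retLvInfo retLvInfo_alt
  have := retLvInfo_main cfg cfg 0 total 0 (by simp) hpre
  rw [this]
  norm_num
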